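-- pv_equiv track=rewrite | github.com/townse33/210CT | Week 2/bigO.py | bigO_compare
-- ===== SOURCE A (Python) =====
-- def bigO_compare(m1,m2,k1,k2):
-- #Function compares runtime of 2 hypothetical functions O(m1*n+k1) and O(m2*n+k2) and outputs integer 'n' where they intercept
--     n = 0
--     o1 = m1 * n + k1
--     o2 = m2 * n + k2
--
--     if m1 == m2:
--     #if m1 and m2 are equal, they are parallel and will not intercept
--         if k1 == k2:
--             #if k1 and k2 are equal, the functions are identical: 0 is output
--             return 0
--         #if constants are different, the functions will never intercept, return false
--         return False
--
--     while True:
--         switch = o2 > o1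
--         o1 = m1 * n + k1
--         o2 = m2 * n + k2
--         switch2 = o2 > o1
--         #functions are tested and compared twice, if comparison changed after functions are updated, functions have intercepted
--         if switch != switch2:
--             return n
--         n+=1
-- ===== SOURCE B (Python) =====
-- # Closed form: solve (m2-m1)*n = k1-k2 with floor/ceil division instead of scanning n upward.
-- def bigO_compare(m1, m2, k1, k2):
--     if m1 == m2:
--         if k1 == k2:
--             return 0
--         return False
--     s = m2 - m1
--     if s > 0:
--         # first n with s*n + (k2-k1) > 0
--         return (k1 - k2) // s + 1
--     # first n with s*n + (k2-k1) <= 0, i.e. ceil((k2-k1)/(-s))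
--     return -((k2 - k1) // s)
-- ===== Notes on version B (the rewrite author's own statement) =====
-- stated objective: alternative
-- what changed: B replaces A's unbounded linear scan for the discrete switch-flip with a closed-form floor/ceil division solving (m2-m1)*n = k1-k2 directly.
-- outside the precondition, e.g. on bigO_compare(1, 1, 0, 2): A returns False, B returns False
import Mathlib
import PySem

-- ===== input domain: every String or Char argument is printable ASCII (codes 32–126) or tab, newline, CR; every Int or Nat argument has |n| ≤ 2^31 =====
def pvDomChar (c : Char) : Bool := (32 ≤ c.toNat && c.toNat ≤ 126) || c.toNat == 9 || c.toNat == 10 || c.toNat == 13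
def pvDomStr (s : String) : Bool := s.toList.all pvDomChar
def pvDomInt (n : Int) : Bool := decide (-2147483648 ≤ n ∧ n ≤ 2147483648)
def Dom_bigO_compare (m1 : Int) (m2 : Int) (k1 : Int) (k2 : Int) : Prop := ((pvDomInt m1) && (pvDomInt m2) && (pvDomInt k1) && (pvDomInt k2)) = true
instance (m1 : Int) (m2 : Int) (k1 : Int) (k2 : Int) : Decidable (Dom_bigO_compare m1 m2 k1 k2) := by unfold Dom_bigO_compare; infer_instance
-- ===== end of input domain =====

-- B computes the crossing point by a closed-form floor/ceil division instead of A's linear scan (alternative algorithm, same return value).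

-- ===== PORT A =====
-- A's `while True` loop, transliterated with a fuel argument that only makes it total in Lean:
-- inside Pre_ the fuel is never exhausted (proved below); the state (n, o1, o2) and the two
-- switch tests are exactly A's.
def bigOLoop (m1 m2 k1 k2 : Int) : Nat → Int → Int → Int → Int
  | 0, _, _, _ => 0
  | fuel + 1, n, o1, o2 =>
      let switch : Bool := decide (o2 > o1)
      let o1' := m1 * n + k1
      let o2' := m2 * n + k2
      let switch2 : Bool := decide (o2' > o1')
      if switch ≠ switch2 then n
      else bigOLoop m1 m2 k1 k2 fuel (n + 1) o1' o2'

def bigO_compare (m1 : Int) (m2 : Int) (k1 : Int) (k2 : Int) : Int :=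
  if m1 = m2 then
    if k1 = k2 then 0
    else 0  -- Python returns the bool False here (not an int); excluded by Pre_
  else
    -- n = 0; o1 = m1*0+k1 = k1; o2 = m2*0+k2 = k2
    bigOLoop m1 m2 k1 k2 ((k1 - k2).natAbs + 2) 0 k1 k2

-- ===== PORT B =====
def bigO_compare_alt (m1 : Int) (m2 : Int) (k1 : Int) (k2 : Int) : Int :=
  if m1 = m2 then
    if k1 = k2 then 0
    else 0  -- Python returns the bool False here (not an int); excluded by Pre_
  else
    -- s = m2 - m1
    if m2 - m1 > 0 then PySem.Int.floordiv (k1 - k2) (m2 - m1) + 1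
    else -(PySem.Int.floordiv (k2 - k1) (m2 - m1))

-- ===== PRECONDITION & SPEC =====
-- Pre_ excludes (a) m1 = m2 ∧ k1 ≠ k2, where A returns the bool False, not an int
-- (B does the same in Python; the ports cannot express it), and (b) the slope/offset
-- combinations on which A's while-loop never finds a flip and diverges.
def Pre_bigO_compare (m1 : Int) (m2 : Int) (k1 : Int) (k2 : Int) : Prop :=
  (m1 = m2 ∧ k1 = k2) ∨ (m1 < m2 ∧ k2 ≤ k1) ∨ (m2 < m1 ∧ k1 < k2)
instance (m1 : Int) (m2 : Int) (k1 : Int) (k2 : Int) : Decidable (Pre_bigO_compare m1 m2 k1 k2) := by unfold Pre_bigO_compare; infer_instance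

def pvWitness_bigO_compare : Int × Int × Int × Int := (1, 3, 7, 2)

def Spec_bigO_compare (m1 : Int) (m2 : Int) (k1 : Int) (k2 : Int) (out : Int) : Prop := out = bigO_compare_alt m1 m2 k1 k2
instance (m1 : Int) (m2 : Int) (k1 : Int) (k2 : Int) (out : Int) : Decidable (Spec_bigO_compare m1 m2 k1 k2 out) := by unfold Spec_bigO_compare; infer_instance

-- ===== CLAIM (what is proved, stated in full; the proofs are below) =====
def Claim_equal_bigO_compare : Prop := ∀ (m1 : Int) (m2 : Int) (k1 : Int) (k2 : Int), Dom_bigO_compare m1 m2 k1 k2 → Pre_bigO_compare m1 m2 k1 k2 → Spec_bigO_compare m1 m2 k1 k2 (bigO_compare m1 m2 k1 k2)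

-- ===== LEMMAS AND PROOFS =====

lemma bigOLoop_succ (m1 m2 k1 k2 : Int) (fuel : Nat) (n o1 o2 : Int) :
    bigOLoop m1 m2 k1 k2 (fuel + 1) n o1 o2 =
      if decide (o2 > o1) ≠ decide (m2 * n + k2 > m1 * n + k1) then n
      else bigOLoop m1 m2 k1 k2 fuel (n + 1) (m1 * n + k1) (m2 * n + k2) := rfl

-- If the comparison m2*m+k2 > m1*m+k1 agrees with its value at 0 for all 0 ≤ m < N and
-- disagrees at N, then the loop entered at n (with the state of step n-1) returns N.
lemma bigOLoop_returns (m1 m2 k1 k2 N : Int)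
    (h1 : ∀ m : Int, 0 ≤ m → m < N → (m2 * m + k2 > m1 * m + k1 ↔ k2 > k1))
    (h2 : ¬(m2 * N + k2 > m1 * N + k1 ↔ k2 > k1)) :
    ∀ (fuel : Nat) (n : Int), 1 ≤ n → n ≤ N → N + 1 ≤ n + fuel →
      bigOLoop m1 m2 k1 k2 fuel n (m1 * (n - 1) + k1) (m2 * (n - 1) + k2) = N := by
  intro fuel
  induction fuel with
  | zero => intro n h1n hnN hf; omega
  | succ fuel ih =>
      intro n h1n hnN hf
      have hprev : (m2 * (n - 1) + k2 > m1 * (n - 1) + k1 ↔ k2 > k1) :=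
        h1 (n - 1) (by omega) (by omega)
      rw [bigOLoop_succ]
      by_cases hn : n = N
      · rw [if_pos]
        · exact hn
        · simp only [ne_eq, decide_eq_decide]
          intro h
          exact h2 (by rw [← hn]; exact h.symm.trans hprev)
      · have hcur : (m2 * n + k2 > m1 * n + k1 ↔ k2 > k1) :=
          h1 n (by omega) (lt_of_le_of_ne hnN hn)
        rw [if_neg]
        · have := ih (n + 1) (by omega) (by omega) (by omega)
          simpa using this
        · simp only [ne_eq, decide_eq_decide, not_not]
          exact hprev.trans hcur.symm

-- Top-level run of A's loop: the first iteration (n = 0) never flips, then bigOLoop_returns.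
lemma bigO_run (m1 m2 k1 k2 N : Int)
    (h1 : ∀ m : Int, 0 ≤ m → m < N → (m2 * m + k2 > m1 * m + k1 ↔ k2 > k1))
    (h2 : ¬(m2 * N + k2 > m1 * N + k1 ↔ k2 > k1))
    (hN : 1 ≤ N) (hF : N ≤ (k1 - k2).natAbs + 1) :
    bigOLoop m1 m2 k1 k2 ((k1 - k2).natAbs + 2) 0 k1 k2 = N := by
  rw [show (k1 - k2).natAbs + 2 = ((k1 - k2).natAbs + 1) + 1 from rfl, bigOLoop_succ, if_neg]
  · have := bigOLoop_returns m1 m2 k1 k2 N h1 h2 ((k1 - k2).natAbs + 1) 1 le_rfl hN (by omega)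
    norm_num at this ⊢
    exact this
  · simp only [ne_eq, decide_eq_decide, not_not]
    constructor <;> intro h <;> [skip; skip] <;> omega

-- ===== VERDICT (by name: the statement is the Claim_ definition above) =====
theorem bigO_compare_spec : Claim_equal_bigO_compare := by
  intro m1 m2 k1 k2 _hdom hpre
  unfold Spec_bigO_compare bigO_compare bigO_compare_alt
  rcases hpre with ⟨hm, hk⟩ | ⟨hm, hk⟩ | ⟨hm, hk⟩
  · simp [hm, hk]
  · -- s = m2 - m1 > 0, a = k1 - k2 ≥ 0
    have hne : ¬ m1 = m2 := by omega
    have hs : m2 - m1 > 0 := by omega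
    rw [if_neg hne, if_neg hne, if_pos hs]
    set s := m2 - m1 with hsdef
    set a := k1 - k2 with hadef
    set q := PySem.Int.floordiv a s with hq
    have hdm : q * s + PySem.Int.mod a s = a := PySem.Int.floordiv_mul_add_mod a s
    have hr0 : 0 ≤ PySem.Int.mod a s := PySem.Int.mod_nonneg a hs
    have hrs : PySem.Int.mod a s < s := PySem.Int.mod_lt a hs
    set r := PySem.Int.mod a s with hr
    have hq0 : 0 ≤ q := by
      by_contra hneg
      have h5 : q * s ≤ (-1) * s := mul_le_mul_of_nonneg_right (by omega) (by omega)
      have h6 : (-1 : Int) * s = -s := by ring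
      omega
    apply bigO_run
    · intro m hm0 hmN
      have h5 : s * m ≤ s * q := mul_le_mul_of_nonneg_left (by omega) (by omega)
      have hid : s * m = m2 * m - m1 * m := by rw [hsdef]; ring
      have hqs : q * s = s * q := by ring
      constructor <;> intro h <;> omega
    · intro h
      have hid : s * (q + 1) = m2 * (q + 1) - m1 * (q + 1) := by rw [hsdef]; ring
      have hv : s * (q + 1) = q * s + s := by ring
      have := h.mp (by omega)
      omega
    · omega
    · have h5 : q * 1 ≤ q * s := mul_le_mul_of_nonneg_left (by omega) hq0
      omega
  · -- s = m2 - m1 < 0, a = k2 - k1 > 0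
    have hne : ¬ m1 = m2 := by omega
    have hs : ¬ m2 - m1 > 0 := by omega
    rw [if_neg hne, if_neg hne, if_neg hs]
    set s := m2 - m1 with hsdef
    have hsneg : s < 0 := by omega
    set a := k2 - k1 with hadef
    set q := PySem.Int.floordiv a s with hq
    have hdm : q * s + PySem.Int.mod a s = a := PySem.Int.floordiv_mul_add_mod a s
    obtain ⟨hrs, hr0⟩ := PySem.Int.mod_neg_bounds a hsneg
    set r := PySem.Int.mod a s with hr
    have hqneg : q < 0 := by
      by_contra hq0
      have h5 : q * s ≤ 0 := mul_nonpos_of_nonneg_of_nonpos (by omega) (by omega)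
      omega
    apply bigO_run
    · intro m hm0 hmN
      have h5 : s * m ≥ s * (-q - 1) := mul_le_mul_of_nonpos_left (by omega) (by omega)
      have hid : s * m = m2 * m - m1 * m := by rw [hsdef]; ring
      have hv : s * (-q - 1) = -(q * s) - s := by ring
      constructor <;> intro h <;> omega
    · intro h
      have hid : s * (-q) = m2 * (-q) - m1 * (-q) := by rw [hsdef]; ring
      have hv : s * (-q) = -(q * s) := by ring
      have := h.mpr (by omega)
      omega
    · omega
    · have h5 : 1 * (-q - 1) ≤ (-s) * (-q - 1) :=
        mul_le_mul_of_nonneg_right (by omega) (by omega)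
      have h6 : (-s) * (-q - 1) = q * s + s := by ring
      have h7 : k1 - k2 = -a := by omega
      rw [h7]
      omega
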